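-- pv_equiv track=rewrite | github.com/Programator2/adventofcode | 2020/20b.py | transform_picture
-- ===== SOURCE A (Python) =====
-- def transform_picture(picture, tran):
--     if tran == 1:
--         picture = zip(*picture)
--         picture = [list(reversed(x)) for x in picture]
--         return picture
--     if tran == 2:
--         return transform_picture(transform_picture(picture, 1), 1)
--     if tran == 3:
--         return transform_picture(transform_picture(transform_picture(picture, 1), 1), 1)
--     if tran == 4:
--         return [list(reversed(x)) for x in picture]
--     if tran == 5:
--         return transform_picture(transform_picture(picture, 4), 1)
--     if tran == 6:
--         return list(reversed(picture))
--     if tran == 7: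
--         return transform_picture(transform_picture(picture, 6), 1)
--     return picture
-- ===== SOURCE B (Python) =====
-- def transpose(p):
--     return [list(col) for col in zip(*p)]
--
--
-- def flip_v(p):
--     return list(reversed(p))
--
--
-- def flip_h(p):
--     return [list(reversed(row)) for row in p]
--
--
-- def transform_picture(picture, tran):
--     # Each symmetry is a direct composition of the three primitive grid
--     # operations transpose / vertical flip / horizontal flip.
--     if tran == 1:
--         return transpose(flip_v(picture))
--     if tran == 2:
--         return transpose(flip_v(transpose(flip_v(picture))))
--     if tran == 3:
--         return flip_v(transpose(picture))
--     if tran == 4: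
--         return flip_h(picture)
--     if tran == 5:
--         return transpose(flip_v(flip_h(picture)))
--     if tran == 6:
--         return flip_v(picture)
--     if tran == 7:
--         return transpose(picture)
--     return picture
-- ===== Notes on version B (the rewrite author's own statement) =====
-- stated objective: alternative
-- what changed: A builds each symmetry by recursively composing zip-based quarter-turns (up to three nested self-calls); B has no recursion and writes each symmetry as a direct composition of three primitive grid operations (transpose, vertical flip, horizontal flip).
import Mathlib
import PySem

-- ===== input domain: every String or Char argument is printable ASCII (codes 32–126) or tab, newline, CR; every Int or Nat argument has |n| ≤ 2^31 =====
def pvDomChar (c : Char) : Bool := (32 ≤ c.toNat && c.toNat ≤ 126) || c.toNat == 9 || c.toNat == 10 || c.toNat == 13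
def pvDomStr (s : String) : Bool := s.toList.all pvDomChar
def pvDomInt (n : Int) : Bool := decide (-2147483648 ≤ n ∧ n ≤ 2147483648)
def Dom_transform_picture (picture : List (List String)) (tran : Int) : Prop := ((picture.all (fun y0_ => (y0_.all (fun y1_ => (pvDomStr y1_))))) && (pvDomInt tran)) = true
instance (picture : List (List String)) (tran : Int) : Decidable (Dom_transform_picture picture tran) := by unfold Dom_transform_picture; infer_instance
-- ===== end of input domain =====

-- B removes A's recursive self-composition of quarter-turns: each symmetry is a
-- direct composition of three primitive grid ops (transpose / flip_v / flip_h).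

-- ===== PORT A =====
-- one step of Python's zip over a list of row iterators: take every head, or stop
def pyZipStep (rows : List (List String)) : Option (List String × List (List String)) :=
  rows.foldr
    (fun r acc =>
      match r, acc with
      | h :: t, some (hs, ts) => some (h :: hs, t :: ts)
      | _, _ => none)
    (some ([], []))

-- zip(*picture) for a NONEMPTY argument list; fuel = length of the first row bounds the steps
def pyZipAux (fuel : Nat) (rows : List (List String)) : List (List String) :=
  match fuel with
  | 0 => []
  | fuel + 1 =>
    match pyZipStep rows with
    | none => []
    | some (hs, ts) => hs :: pyZipAux fuel ts

-- Python zip(*picture) (zip() with no arguments is empty)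
def pyZip (rows : List (List String)) : List (List String) :=
  match rows with
  | [] => []
  | r :: rest => pyZipAux r.length (r :: rest)

def transform_picture (picture : List (List String)) (tran : Int) : List (List String) :=
  if tran = 1 then ((pyZip picture).map (fun x => x.reverse))
  else if tran = 2 then transform_picture (transform_picture picture 1) 1
  else if tran = 3 then
    transform_picture (transform_picture (transform_picture picture 1) 1) 1
  else if tran = 4 then picture.map (fun x => x.reverse)
  else if tran = 5 then transform_picture (transform_picture picture 4) 1
  else if tran = 6 then picture.reverse
  else if tran = 7 then transform_picture (transform_picture picture 6) 1
  else picture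
termination_by tran.toNat
decreasing_by all_goals (subst_vars; decide)

-- ===== PORT B =====
-- [list(col) for col in zip(*p)] (pyZip already yields lists)
def transposeP (p : List (List String)) : List (List String) := pyZip p

-- list(reversed(p))
def flipV (p : List (List String)) : List (List String) := p.reverse

-- [list(reversed(row)) for row in p]
def flipH (p : List (List String)) : List (List String) := p.map (fun row => row.reverse)

def transform_picture_alt (picture : List (List String)) (tran : Int) : List (List String) :=
  if tran = 1 then transposeP (flipV picture)
  else if tran = 2 then transposeP (flipV (transposeP (flipV picture)))
  else if tran = 3 then flipV (transposeP picture)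
  else if tran = 4 then flipH picture
  else if tran = 5 then transposeP (flipV (flipH picture))
  else if tran = 6 then flipV picture
  else if tran = 7 then transposeP picture
  else picture

-- ===== PRECONDITION & SPEC =====
def Spec_transform_picture (picture : List (List String)) (tran : Int) (out : List (List String)) : Prop := out = transform_picture_alt picture tran
instance (picture : List (List String)) (tran : Int) (out : List (List String)) : Decidable (Spec_transform_picture picture tran out) := by unfold Spec_transform_picture; infer_instance

-- ===== CLAIM (what is proved, stated in full; the proofs are below) =====
def Claim_equal_transform_picture : Prop := ∀ (picture : List (List String)) (tran : Int), Dom_transform_picture picture tran → Spec_transform_picture picture tran (transform_picture picture tran)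

-- ===== LEMMAS AND PROOFS =====

-- min of a list of naturals; default 0 (models zip's truncation width)
def minLenL (l : List Nat) : Nat :=
  match l with
  | [] => 0
  | h :: t => t.foldl Nat.min h

def minLen (p : List (List String)) : Nat := minLenL (p.map List.length)

def cell (p : List (List String)) (i j : Nat) : String := (p.getD i []).getD j ""

theorem natMin_eq_left (a b : Nat) (h : a ≤ b) : Nat.min a b = a := Nat.min_eq_left h
theorem natMin_eq_right (a b : Nat) (h : b ≤ a) : Nat.min a b = b := Nat.min_eq_right h

theorem foldl_min_le_init (t : List Nat) (h : Nat) : t.foldl Nat.min h ≤ h := by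
  induction t generalizing h with
  | nil => simp
  | cons a t ih => exact le_trans (ih (Nat.min h a)) (Nat.min_le_left h a)

theorem foldl_min_le_mem (t : List Nat) (h a : Nat) (ha : a ∈ t) : t.foldl Nat.min h ≤ a := by
  induction t generalizing h with
  | nil => cases ha
  | cons b t ih =>
    rcases List.mem_cons.mp ha with rfl | hm
    · exact le_trans (foldl_min_le_init t (Nat.min h a)) (Nat.min_le_right h a)
    · exact ih (Nat.min h b) hm

theorem foldl_min_mem (t : List Nat) (h : Nat) : t.foldl Nat.min h = h ∨ t.foldl Nat.min h ∈ t := by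
  induction t generalizing h with
  | nil => left; rfl
  | cons a t ih =>
    rcases ih (Nat.min h a) with heq | hm
    · rcases Nat.le_total h a with hh | hh
      · left; rw [List.foldl_cons, heq]; exact natMin_eq_left h a hh
      · right; rw [List.foldl_cons, heq, natMin_eq_right h a hh]
        exact List.mem_cons_self
    · right; exact List.mem_cons_of_mem _ hm

theorem minLenL_le_mem (l : List Nat) (a : Nat) (ha : a ∈ l) : minLenL l ≤ a := by
  cases l with
  | nil => cases ha
  | cons h t =>
    rcases List.mem_cons.mp ha with rfl | hm
    · exact foldl_min_le_init t a
    · exact foldl_min_le_mem t h a hm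

theorem minLenL_mem (l : List Nat) (hl : l ≠ []) : minLenL l ∈ l := by
  cases l with
  | nil => exact absurd rfl hl
  | cons h t =>
    rcases foldl_min_mem t h with heq | hm
    · simp [minLenL, heq]
    · exact List.mem_cons_of_mem _ hm

theorem minLenL_reverse (l : List Nat) : minLenL l.reverse = minLenL l := by
  cases l with
  | nil => rfl
  | cons h t =>
    apply Nat.le_antisymm
    · exact minLenL_le_mem _ _ (List.mem_reverse.mpr (minLenL_mem (h :: t) (by simp)))
    · exact minLenL_le_mem _ _
        (List.mem_reverse.mp (minLenL_mem (h :: t).reverse (by simp)))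

theorem minLenL_sub_one (l : List Nat) : minLenL (l.map (· - 1)) = minLenL l - 1 := by
  cases l with
  | nil => rfl
  | cons h t =>
    show (t.map (· - 1)).foldl Nat.min (h - 1) = t.foldl Nat.min h - 1
    induction t generalizing h with
    | nil => rfl
    | cons a t ih =>
      have : Nat.min (h - 1) (a - 1) = Nat.min h a - 1 := by
        rcases Nat.le_total h a with hh | hh
        · rw [natMin_eq_left h a hh, natMin_eq_left _ _ (by omega : h - 1 ≤ a - 1)]
        · rw [natMin_eq_right h a hh, natMin_eq_right _ _ (by omega : a - 1 ≤ h - 1)]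
      simp only [List.map, List.foldl, this]
      exact ih (Nat.min h a)

theorem minLen_le (p : List (List String)) (r : List String) (hr : r ∈ p) :
    minLen p ≤ r.length :=
  minLenL_le_mem _ _ (List.mem_map.mpr ⟨r, hr, rfl⟩)

theorem minLen_reverse (p : List (List String)) : minLen p.reverse = minLen p := by
  unfold minLen
  rw [List.map_reverse, minLenL_reverse]

theorem tail_getD (r : List String) (j : Nat) : r.tail.getD j "" = r.getD (j + 1) "" := by
  cases r <;> simp

theorem getD_range_map {β : Type} (g : Nat → β) (d : β) (b j : Nat) (h : j < b) :
    ((List.range b).map g).getD j d = g j := by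
  rw [List.getD_eq_getElem _ _ (by simpa using h)]
  simp

-- zip characterisation
theorem pyZipStep_none (rows : List (List String)) (hex : [] ∈ rows) :
    pyZipStep rows = none := by
  induction rows with
  | nil => cases hex
  | cons r rest ih =>
    rcases List.mem_cons.mp hex with rfl | hm
    · rfl
    · have := ih hm
      simp [pyZipStep] at this ⊢
      rw [this]
      cases r <;> rfl

theorem pyZipStep_some (rows : List (List String)) (hall : ∀ r ∈ rows, r ≠ []) :
    pyZipStep rows = some (rows.map (fun r => r.getD 0 ""), rows.map List.tail) := by
  induction rows with
  | nil => rfl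
  | cons r rest ih =>
    have hr : r ≠ [] := hall r (by simp)
    have hrest := ih (fun x hx => hall x (List.mem_cons_of_mem _ hx))
    cases r with
    | nil => exact absurd rfl hr
    | cons c cs =>
      simp only [pyZipStep, List.foldr] at hrest ⊢
      rw [hrest]
      rfl

theorem pyZipAux_eq (fuel : Nat) : ∀ rows : List (List String), rows ≠ [] →
    pyZipAux fuel rows =
      (List.range (Nat.min fuel (minLen rows))).map
        (fun j => rows.map (fun r => r.getD j "")) := by
  induction fuel with
  | zero => intro rows _; simp [pyZipAux]
  | succ fuel ih =>
    intro rows hne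
    by_cases hex : [] ∈ rows
    · have hm0 : minLen rows = 0 := by
        have := minLen_le rows [] hex
        simpa using this
      simp [pyZipAux, pyZipStep_none rows hex, hm0]
    · have hall : ∀ r ∈ rows, r ≠ [] := by
        intro r hr h; exact hex (h ▸ hr)
      have hM : 1 ≤ minLen rows := by
        have hmem := minLenL_mem (rows.map List.length) (by simpa using hne)
        rcases List.mem_map.mp hmem with ⟨s, hs, hlen⟩
        have hs' : s ≠ [] := hall s hs
        have hpos : 1 ≤ s.length := by
          cases s with
          | nil => exact absurd rfl hs'
          | cons a b => simp
        show 1 ≤ minLenL (rows.map List.length)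
        omega
      have htails : rows.map List.tail ≠ [] := by simpa using hne
      have hminTail : minLen (rows.map List.tail) = minLen rows - 1 := by
        have h1 : (rows.map List.tail).map List.length
            = (rows.map List.length).map (· - 1) := by
          simp [List.map_map, Function.comp, List.length_tail]
        show minLenL ((rows.map List.tail).map List.length) = _
        rw [h1, minLenL_sub_one]; rfl
      have hstep := pyZipStep_some rows hall
      have hmin : Nat.min (fuel + 1) (minLen rows)
          = Nat.min fuel (minLen rows - 1) + 1 := by
        rcases Nat.le_total (fuel + 1) (minLen rows) with hh | hh
        · rw [natMin_eq_left _ _ hh, natMin_eq_left _ _ (by omega : fuel ≤ minLen rows - 1)]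
        · rw [natMin_eq_right _ _ hh,
            natMin_eq_right _ _ (by omega : minLen rows - 1 ≤ fuel)]
          omega
      simp only [pyZipAux, hstep]
      rw [ih (rows.map List.tail) htails, hminTail, hmin,
          List.range_succ_eq_map, List.map_cons, List.map_map]
      congr 1
      apply List.map_congr_left
      intro j _
      simp only [Function.comp, List.map_map]
      apply List.map_congr_left
      intro r _
      exact tail_getD r j

theorem pyZip_eq (rows : List (List String)) :
    pyZip rows =
      (List.range (minLen rows)).map (fun j => rows.map (fun r => r.getD j "")) := by
  cases rows with
  | nil => rfl
  | cons r rest =>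
    have hle : minLen (r :: rest) ≤ r.length := minLen_le _ r (by simp)
    have : Nat.min r.length (minLen (r :: rest)) = minLen (r :: rest) :=
      natMin_eq_right _ _ hle
    rw [show pyZip (r :: rest) = pyZipAux r.length (r :: rest) from rfl,
        pyZipAux_eq r.length (r :: rest) (by simp), this]

-- A's zip-then-reverse-rows quarter-turn equals B's transpose-of-flipped
theorem rotEq (p : List (List String)) :
    (pyZip p).map (fun x => x.reverse) = pyZip p.reverse := by
  rw [pyZip_eq, pyZip_eq, minLen_reverse, List.map_map]
  apply List.map_congr_left
  intro j _
  simp [Function.comp, List.map_reverse]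

-- A's tran 1 is B's quarter-turn
theorem A_one (p : List (List String)) :
    transform_picture p 1 = pyZip p.reverse := by
  rw [transform_picture]
  exact rotEq p

-- p.map g as a range-map of cells
theorem map_eq_range_map (p : List (List String)) (g : List String → String) :
    p.map g = (List.range p.length).map (fun i => g (p.getD i [])) := by
  apply List.ext_getElem
  · simp
  · intro i h1 h2
    simp only [List.length_map] at h1
    rw [List.getElem_map, List.getElem_map, List.getElem_range,
        List.getD_eq_getElem _ _ (by simpa using h1)]

theorem reverse_range_map {β : Type} (m : Nat) (f : Nat → β) :
    ((List.range m).map f).reverse = (List.range m).map (fun j => f (m - 1 - j)) := by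
  apply List.ext_getElem
  · simp
  · intro i h1 h2
    simp only [List.length_reverse, List.length_map, List.length_range] at h1
    rw [List.getElem_reverse, List.getElem_map, List.getElem_map, List.getElem_range,
        List.getElem_range]
    simp only [List.length_map, List.length_range]

-- the quarter-turn written as a range-map of cells
theorem rot_range (p : List (List String)) :
    pyZip p.reverse =
      (List.range (minLen p)).map
        (fun j => (List.range p.length).map (fun i => cell p (p.length - 1 - i) j)) := by
  rw [pyZip_eq, minLen_reverse]
  apply List.map_congr_left
  intro j _
  rw [map_eq_range_map p.reverse (fun r => r.getD j ""), List.length_reverse]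
  apply List.map_congr_left
  intro i hi
  rw [List.mem_range] at hi
  unfold cell
  by_cases h : p = []
  · subst h; simp at hi
  · have hlen : 0 < p.length := List.length_pos_iff.mpr h
    congr 1
    rw [List.getD_eq_getElem p.reverse _ (by simp; omega),
        List.getD_eq_getElem p _ (by omega), List.getElem_reverse]

theorem cell_range_map (a : Nat) (F : Nat → List String) (i j : Nat) (h : i < a) :
    cell ((List.range a).map F) i j = (F i).getD j "" := by
  unfold cell
  rw [getD_range_map F [] a i h]

theorem foldl_min_replicate (b : Nat) : ∀ a, (List.replicate a b).foldl Nat.min b = b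
  | 0 => rfl
  | a + 1 => by
    rw [List.replicate_succ, List.foldl_cons,
      show Nat.min b b = b from Nat.min_self b]
    exact foldl_min_replicate b a

theorem minLen_range_map (a b : Nat) (G : Nat → Nat → String) (ha : a ≠ 0) :
    minLen ((List.range a).map (fun j => (List.range b).map (G j))) = b := by
  have h1 : ((List.range a).map (fun j => (List.range b).map (G j))).map List.length
      = List.replicate a b := by
    simp [List.map_map, Function.comp_def]
  show minLenL _ = b
  rw [h1]
  cases a with
  | zero => exact absurd rfl ha
  | succ a =>
    rw [List.replicate_succ]
    exact foldl_min_replicate b a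

-- quarter-turn of a rectangular range-map picture
theorem rot_of_range_map (a b : Nat) (G : Nat → Nat → String) (ha : a ≠ 0) :
    pyZip ((List.range a).map (fun j => (List.range b).map (G j))).reverse
      = (List.range b).map (fun j => (List.range a).map (fun i => G (a - 1 - i) j)) := by
  rw [rot_range, minLen_range_map a b G ha, List.length_map, List.length_range]
  apply List.map_congr_left
  intro j hj
  apply List.map_congr_left
  intro i hi
  rw [List.mem_range] at hj hi
  rw [cell_range_map a _ (a - 1 - i) j (by omega),
      getD_range_map _ _ b j hj]

-- three quarter-turns equal B's reversed transpose
theorem rot3_eq (p : List (List String)) :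
    pyZip (pyZip (pyZip p.reverse).reverse).reverse = (pyZip p).reverse := by
  by_cases hm : minLen p = 0
  · have h1 : pyZip p.reverse = [] := by
      rw [pyZip_eq, minLen_reverse, hm]; rfl
    have h2 : pyZip p = [] := by rw [pyZip_eq, hm]; rfl
    rw [h1, h2]; rfl
  · have hp : p ≠ [] := by
      intro h; subst h; exact hm rfl
    have hn : p.length ≠ 0 := by
      simpa [List.length_eq_zero_iff] using hp
    rw [rot_range p,
        rot_of_range_map (minLen p) p.length
          (fun j i => cell p (p.length - 1 - i) j) hm,
        rot_of_range_map p.length (minLen p)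
          (fun j i => cell p (p.length - 1 - j) (minLen p - 1 - i)) hn,
        pyZip_eq, reverse_range_map]
    apply List.map_congr_left
    intro j hj
    rw [map_eq_range_map p (fun r => r.getD (minLen p - 1 - j) "")]
    apply List.map_congr_left
    intro i hi
    rw [List.mem_range] at hj hi
    unfold cell
    rw [show p.length - 1 - (p.length - 1 - i) = i by omega]

theorem case1 (p : List (List String)) :
    transform_picture p 1 = transform_picture_alt p 1 := by
  rw [A_one]; simp only [transform_picture_alt]; norm_num
  rfl

theorem case2 (p : List (List String)) :
    transform_picture p 2 = transform_picture_alt p 2 := by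
  rw [transform_picture]; norm_num
  rw [A_one, A_one]
  simp only [transform_picture_alt]; norm_num
  rfl

theorem case3 (p : List (List String)) :
    transform_picture p 3 = transform_picture_alt p 3 := by
  rw [transform_picture]; norm_num
  rw [A_one, A_one, A_one, rot3_eq]
  simp only [transform_picture_alt]; norm_num
  rfl

theorem case4 (p : List (List String)) :
    transform_picture p 4 = transform_picture_alt p 4 := by
  rw [transform_picture]; simp only [transform_picture_alt]; norm_num
  rfl

theorem case5 (p : List (List String)) :
    transform_picture p 5 = transform_picture_alt p 5 := by
  have h4 : transform_picture p 4 = flipH p := by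
    rw [transform_picture]; norm_num; rfl
  rw [transform_picture]; norm_num
  rw [A_one, h4]
  simp only [transform_picture_alt]; norm_num
  rfl

theorem case6 (p : List (List String)) :
    transform_picture p 6 = transform_picture_alt p 6 := by
  rw [transform_picture]; simp only [transform_picture_alt]; norm_num
  rfl

theorem case7 (p : List (List String)) :
    transform_picture p 7 = transform_picture_alt p 7 := by
  have h6 : transform_picture p 6 = p.reverse := by
    rw [transform_picture]; norm_num
  rw [transform_picture]; norm_num
  rw [A_one, h6, List.reverse_reverse]
  simp only [transform_picture_alt]; norm_num
  rfl

theorem case_else (p : List (List String)) (tran : Int)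
    (h1 : tran ≠ 1) (h2 : tran ≠ 2) (h3 : tran ≠ 3) (h4 : tran ≠ 4)
    (h5 : tran ≠ 5) (h6 : tran ≠ 6) (h7 : tran ≠ 7) :
    transform_picture p tran = transform_picture_alt p tran := by
  rw [transform_picture]
  simp only [transform_picture_alt, if_neg h1, if_neg h2, if_neg h3, if_neg h4,
    if_neg h5, if_neg h6, if_neg h7]

-- ===== VERDICT (by name: the statement is the Claim_ definition above) =====
theorem transform_picture_spec : Claim_equal_transform_picture := by
  intro p tran _
  show transform_picture p tran = transform_picture_alt p tran
  by_cases h1 : tran = 1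
  · subst h1; exact case1 p
  by_cases h2 : tran = 2
  · subst h2; exact case2 p
  by_cases h3 : tran = 3
  · subst h3; exact case3 p
  by_cases h4 : tran = 4
  · subst h4; exact case4 p
  by_cases h5 : tran = 5
  · subst h5; exact case5 p
  by_cases h6 : tran = 6
  · subst h6; exact case6 p
  by_cases h7 : tran = 7
  · subst h7; exact case7 p
  exact case_else p tran h1 h2 h3 h4 h5 h6 h7
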